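-- pv_equiv track=rewrite | github.com/TudorParas/Dialogue-systems-for-language-learning | assessment/input_assessment.py | correct_utterance
-- ===== SOURCE A (Python) =====
-- def correct_utterance(textual_errors, utterance):
--     correct_sent = utterance
--     # While we correct the characters get shifter as we add new characters.
--     #  We account for that with this by keeping track of the change
--     shift = 0
--     for error in textual_errors:
--         error_begin_index = error[0] + shift
--         error_end_index = error[1] + shift
--         correct_word = error[2]
--
--         incorrect_word_len = error_end_index - error_begin_index
--         shift = shift + (len(correct_word) - incorrect_word_len)
--
--         correct_sent = correct_sent[:error_begin_index] + correct_word + correct_sent[error_end_index:]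
--     return correct_sent
-- ===== SOURCE B (Python) =====
-- def correct_utterance(textual_errors, utterance):
--     # Keep a worklist of pending corrections over the *current* string: apply the
--     # first correction, then renumber the remaining ones by how much the string
--     # grew or shrank, so no running shift needs to be carried alongside.
--     errors = list(textual_errors)
--     result = utterance
--     while errors:
--         begin, end, word = errors[0]
--         result = result[:begin] + word + result[end:]
--         delta = len(word) - (end - begin)
--         errors = [(b + delta, e + delta, w) for b, e, w in errors[1:]]
--     return result
-- ===== Notes on version B (the rewrite author's own statement) =====
-- stated objective: alternative
-- what changed: B keeps a worklist of pending corrections and renumbers the remaining spans by the length delta after each splice, instead of A's running shift accumulator added to every raw index; equivalence is total (no precondition).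
import Mathlib
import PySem

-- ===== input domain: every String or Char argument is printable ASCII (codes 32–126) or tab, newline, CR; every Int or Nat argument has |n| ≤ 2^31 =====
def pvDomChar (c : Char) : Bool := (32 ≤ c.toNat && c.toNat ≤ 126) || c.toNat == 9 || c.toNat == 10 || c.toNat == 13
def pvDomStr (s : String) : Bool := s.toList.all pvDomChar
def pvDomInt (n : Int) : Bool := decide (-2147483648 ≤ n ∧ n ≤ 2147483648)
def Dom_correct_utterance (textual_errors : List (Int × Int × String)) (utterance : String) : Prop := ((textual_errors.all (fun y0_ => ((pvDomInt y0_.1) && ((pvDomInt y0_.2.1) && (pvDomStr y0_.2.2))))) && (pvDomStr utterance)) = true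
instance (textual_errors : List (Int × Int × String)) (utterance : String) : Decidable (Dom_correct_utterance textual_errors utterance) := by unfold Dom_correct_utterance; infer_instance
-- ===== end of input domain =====

-- B keeps a worklist of pending corrections, renumbering the remaining spans after each
-- splice, instead of A's running shift accumulator; objective: alternative decomposition,
-- same result on every input (equivalence is total).

-- ===== PORT A =====
-- one iteration of A's loop: state is (correct_sent, shift)
def pvStepA (st : String × Int) (error : Int × Int × String) : String × Int :=
  let error_begin_index := error.1 + st.2
  let error_end_index := error.2.1 + st.2
  let correct_word := error.2.2
  let incorrect_word_len := error_end_index - error_begin_index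
  let shift := st.2 + (PySem.Str.len correct_word - incorrect_word_len)
  (PySem.Str.slice st.1 none (some error_begin_index) ++ correct_word ++
     PySem.Str.slice st.1 (some error_end_index) none, shift)

def correct_utterance (textual_errors : List (Int × Int × String)) (utterance : String) : String :=
  (textual_errors.foldl pvStepA (utterance, 0)).1

-- ===== PORT B =====
-- B's while loop: the worklist shrinks by one each round (ported as recursion on it)
def pvGoB : List (Int × Int × String) → String → String
  | [], result => result
  | (b, e, w) :: rest, result =>
    let result' := PySem.Str.slice result none (some b) ++ w ++
        PySem.Str.slice result (some e) none
    let delta := PySem.Str.len w - (e - b)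
    pvGoB (rest.map (fun x => (x.1 + delta, x.2.1 + delta, x.2.2))) result'
termination_by errs _ => errs.length
decreasing_by simp

def correct_utterance_alt (textual_errors : List (Int × Int × String)) (utterance : String) : String :=
  pvGoB textual_errors utterance

-- ===== PRECONDITION & SPEC =====
def Spec_correct_utterance (textual_errors : List (Int × Int × String)) (utterance : String) (out : String) : Prop := out = correct_utterance_alt textual_errors utterance
instance (textual_errors : List (Int × Int × String)) (utterance : String) (out : String) : Decidable (Spec_correct_utterance textual_errors utterance out) := by unfold Spec_correct_utterance; infer_instance

-- ===== CLAIM (what is proved, stated in full; the proofs are below) =====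
def Claim_equal_correct_utterance : Prop := ∀ (textual_errors : List (Int × Int × String)) (utterance : String), Dom_correct_utterance textual_errors utterance → Spec_correct_utterance textual_errors utterance (correct_utterance textual_errors utterance)

-- ===== LEMMAS AND PROOFS =====

-- A's fold carrying shift = B's recursion on the worklist pre-shifted by that shift
lemma pvFold_eq_goB (errs : List (Int × Int × String)) :
    ∀ (shift : Int) (s : String),
      (errs.foldl pvStepA (s, shift)).1
        = pvGoB (errs.map (fun x => (x.1 + shift, x.2.1 + shift, x.2.2))) s := by
  induction errs with
  | nil => intro shift s; simp [pvGoB]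
  | cons e t ih =>
    intro shift s
    obtain ⟨b, e2, w⟩ := e
    simp only [List.foldl_cons, List.map_cons]
    rw [pvGoB]
    simp only [pvStepA]
    have harg : (t.map (fun x => (x.1 + shift, x.2.1 + shift, x.2.2))).map
          (fun x => (x.1 + (PySem.Str.len w - (e2 + shift - (b + shift))),
                     x.2.1 + (PySem.Str.len w - (e2 + shift - (b + shift))), x.2.2))
        = t.map (fun x => (x.1 + (shift + (PySem.Str.len w - (e2 - b))),
                           x.2.1 + (shift + (PySem.Str.len w - (e2 - b))), x.2.2)) := by
      rw [List.map_map]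
      apply List.map_congr_left
      intro x _
      simp only [Function.comp]
      refine Prod.ext (by ring) (Prod.ext (by ring) rfl)
    have hsh : shift + (PySem.Str.len w - (e2 + shift - (b + shift)))
        = shift + (PySem.Str.len w - (e2 - b)) := by ring
    rw [harg, hsh]
    exact ih (shift + (PySem.Str.len w - (e2 - b))) _

-- ===== VERDICT (by name: the statement is the Claim_ definition above) =====
theorem correct_utterance_spec : Claim_equal_correct_utterance := by
  intro errs utt _
  unfold Spec_correct_utterance correct_utterance correct_utterance_alt
  rw [pvFold_eq_goB errs 0 utt]
  congr 1
  exact List.map_congr_left (fun x _ => by simp) |>.trans (List.map_id _)
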